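-- pv_equiv track=rewrite | github.com/mpomarlan/abe_sim | src/abe_sim/geom.py | extrudeBox
-- ===== SOURCE A (Python) =====
-- def translateVector(va, vb):
--     return [a+b for a,b in zip(va, vb)]
--
-- def extrudeBox(box, a, b=None):
--     aabbMin, aabbMax = box
--     if None == b:
--         b = a
--     extAMin = translateVector(aabbMin, a)
--     extAMax = translateVector(aabbMax, a)
--     extBMin = translateVector(aabbMin, b)
--     extBMax = translateVector(aabbMax, b)
--     retqMin = [min(a,b) for a,b in zip(extAMin, extBMin)]
--     retqMax = [max(a,b) for a,b in zip(extAMax, extBMax)]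
--     return retqMin, retqMax
-- ===== SOURCE B (Python) =====
-- def extrudeBox(box, a, b=None):
--     aabbMin, aabbMax = box
--     if b is None:
--         b = a
--     def shifted(bound, pick):
--         out = []
--         for m, p, q in zip(bound, a, b):
--             out.append(m + pick(p, q))
--         return out
--     return shifted(aabbMin, min), shifted(aabbMax, max)
-- ===== Notes on version B (the rewrite author's own statement) =====
-- stated objective: simpler
-- what changed: Replaces A's staged pipeline (four translated corner vectors, then pairwise min/max passes) with one fused single pass per bound: a helper walks the bound and both translation vectors together and emits bound_i + min/max(a_i, b_i) directly, with no intermediate vectors; correct because adding a constant commutes with min/max.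
import Mathlib
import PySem

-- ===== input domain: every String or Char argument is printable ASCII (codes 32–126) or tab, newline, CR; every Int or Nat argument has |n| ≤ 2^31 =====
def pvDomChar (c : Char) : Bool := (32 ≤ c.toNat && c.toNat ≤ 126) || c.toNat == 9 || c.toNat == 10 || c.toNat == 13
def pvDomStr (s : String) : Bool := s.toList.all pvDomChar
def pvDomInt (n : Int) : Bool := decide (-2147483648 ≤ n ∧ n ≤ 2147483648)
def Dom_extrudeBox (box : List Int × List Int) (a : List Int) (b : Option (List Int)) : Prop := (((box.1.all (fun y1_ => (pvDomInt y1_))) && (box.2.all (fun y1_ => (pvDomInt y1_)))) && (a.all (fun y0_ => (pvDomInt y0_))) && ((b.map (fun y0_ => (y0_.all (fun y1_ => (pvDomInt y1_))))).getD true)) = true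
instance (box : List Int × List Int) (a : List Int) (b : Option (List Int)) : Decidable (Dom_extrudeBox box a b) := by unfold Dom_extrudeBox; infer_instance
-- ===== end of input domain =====

-- B fuses the work into one single pass per bound (a recursive helper emitting bound_i + min/max(a_i,b_i)),
-- instead of A's four translated corner vectors plus pairwise min/max passes; objective: simpler.


-- ===== PORT A =====
def translateVector (va vb : List Int) : List Int :=
  (va.zip vb).map (fun p => p.1 + p.2)

def extrudeBox (box : List Int × List Int) (a : List Int) (b : Option (List Int)) : List Int × List Int :=
  let aabbMin := box.1
  let aabbMax := box.2
  let b' := b.getD a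
  let extAMin := translateVector aabbMin a
  let extAMax := translateVector aabbMax a
  let extBMin := translateVector aabbMin b'
  let extBMax := translateVector aabbMax b'
  let retqMin := (extAMin.zip extBMin).map (fun p => min p.1 p.2)
  let retqMax := (extAMax.zip extBMax).map (fun p => max p.1 p.2)
  (retqMin, retqMax)

-- ===== PORT B =====
-- single fused pass: walk bound, a, b together, emitting bound_i + pick(a_i, b_i)
def pvShifted (bound a b : List Int) (pick : Int → Int → Int) : List Int :=
  match bound, a, b with
  | m :: ms, p :: ps, q :: qs => (m + pick p q) :: pvShifted ms ps qs pick
  | _, _, _ => []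

def extrudeBox_alt (box : List Int × List Int) (a : List Int) (b : Option (List Int)) : List Int × List Int :=
  let b' := b.getD a
  (pvShifted box.1 a b' min, pvShifted box.2 a b' max)

-- ===== PRECONDITION & SPEC =====
def Spec_extrudeBox (box : List Int × List Int) (a : List Int) (b : Option (List Int)) (out : List Int × List Int) : Prop := out = extrudeBox_alt box a b
instance (box : List Int × List Int) (a : List Int) (b : Option (List Int)) (out : List Int × List Int) : Decidable (Spec_extrudeBox box a b out) := by unfold Spec_extrudeBox; infer_instance

-- ===== CLAIM (what is proved, stated in full; the proofs are below) =====
def Claim_equal_extrudeBox : Prop := ∀ (box : List Int × List Int) (a : List Int) (b : Option (List Int)), Dom_extrudeBox box a b → Spec_extrudeBox box a b (extrudeBox box a b)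

-- ===== LEMMAS AND PROOFS =====
-- A's min of two translated vectors equals B's fused pass with pick = min
theorem min_fused (m a b : List Int) :
    ((translateVector m a).zip (translateVector m b)).map (fun p => min p.1 p.2)
      = pvShifted m a b min := by
  induction m generalizing a b with
  | nil => simp [translateVector, pvShifted]
  | cons x xs ih =>
    cases a with
    | nil => simp [translateVector, pvShifted]
    | cons y ys =>
      cases b with
      | nil => simp [translateVector, pvShifted]
      | cons z zs =>
        simpa [translateVector, pvShifted, min_add_add_left] using ih ys zs

theorem max_fused (m a b : List Int) :
    ((translateVector m a).zip (translateVector m b)).map (fun p => max p.1 p.2)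
      = pvShifted m a b max := by
  induction m generalizing a b with
  | nil => simp [translateVector, pvShifted]
  | cons x xs ih =>
    cases a with
    | nil => simp [translateVector, pvShifted]
    | cons y ys =>
      cases b with
      | nil => simp [translateVector, pvShifted]
      | cons z zs =>
        simpa [translateVector, pvShifted, max_add_add_left] using ih ys zs

-- ===== VERDICT (by name: the statement is the Claim_ definition above) =====
theorem extrudeBox_spec : Claim_equal_extrudeBox := by
  intro box a b _
  unfold Spec_extrudeBox extrudeBox extrudeBox_alt
  simp only
  exact Prod.ext (min_fused _ _ _) (max_fused _ _ _)
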